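-- pv_equiv track=rewrite | github.com/l1ghtspeed/Programming-Notes | Practice Problems/HackerRank Problems/EasyPracticeProblems.py | swapToSort
-- ===== SOURCE A (Python) =====
-- def swapToSort(a):
--     # Return -1 or 0 or 1 as described in the problem statement.
--
--     if (all(a[i] <= a[i+1] for i in range(len(a)-1))):
--         return 0
--
--     for i in range(len(a)):
--         for j in range(i, len(a)):
--             b = list(a)
--             b[j] = a[i]
--             b[i] = a[j]
--
--             if (all(b[k] <= b[k+1] for k in range(len(b)-1))):
--                 return 1
--     return -1
-- ===== SOURCE B (Python) =====
-- def swapToSort(a):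
--     # Compare with the sorted copy: 0 if already sorted, 1 if exactly two
--     # mismatched positions that a single swap fixes, else -1.
--     s = sorted(a)
--     d = [k for k in range(len(a)) if a[k] != s[k]]
--     if not d:
--         return 0
--     if len(d) == 2 and a[d[0]] == s[d[1]] and a[d[1]] == s[d[0]]:
--         return 1
--     return -1
-- ===== Notes on version B (the rewrite author's own statement) =====
-- stated objective: faster
-- what changed: Replaces the O(n^3) try-every-swap search with one comparison against the sorted copy: collect mismatch positions and check that a single swap of the (exactly two) mismatches fixes them.
import Mathlib
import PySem

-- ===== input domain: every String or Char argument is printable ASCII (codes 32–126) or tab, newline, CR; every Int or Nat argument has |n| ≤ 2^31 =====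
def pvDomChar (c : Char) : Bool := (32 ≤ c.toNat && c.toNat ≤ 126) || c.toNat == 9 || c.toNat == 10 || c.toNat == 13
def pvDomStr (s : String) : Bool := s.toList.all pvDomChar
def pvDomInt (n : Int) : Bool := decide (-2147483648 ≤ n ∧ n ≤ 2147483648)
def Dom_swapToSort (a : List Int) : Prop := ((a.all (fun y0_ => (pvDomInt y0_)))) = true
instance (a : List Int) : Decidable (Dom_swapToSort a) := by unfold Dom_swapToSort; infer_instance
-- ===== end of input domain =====

-- B replaces A's try-every-swap search by a single comparison against the sorted copy (mismatch positions); same return value, asymptotically faster.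

-- ===== PORT A =====
-- a[i] where 0 ≤ i < len(a) always holds at the call sites (the default is never used)
def pvGetD (l : List Int) (i : Int) : Int := PySem.List.pyGetD l i 0

-- all(l[k] <= l[k+1] for k in range(len(l)-1))
def pvAdjSorted (l : List Int) : Bool :=
  (PySem.List.pyRange 0 ((l.length : Int) - 1) 1).all (fun k => pvGetD l k ≤ pvGetD l (k + 1))

-- b = list(a); b[j] = a[i]; b[i] = a[j]   (i, j are nonneg and in range at the call sites, so .toNat is exact)
def pvSwap (a : List Int) (i j : Int) : List Int :=
  (a.set j.toNat (pvGetD a i)).set i.toNat (pvGetD a j)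

def swapToSort (a : List Int) : Int :=
  if pvAdjSorted a then 0
  else if (PySem.List.pyRange 0 (a.length : Int) 1).any (fun i =>
      (PySem.List.pyRange i (a.length : Int) 1).any (fun j => pvAdjSorted (pvSwap a i j)))
    then 1 else -1

-- ===== PORT B =====
def swapToSort_alt (a : List Int) : Int :=
  let s := PySem.List.sorted a (fun x => x) false
  let d := (PySem.List.pyRange 0 (a.length : Int) 1).filter (fun k => pvGetD a k != pvGetD s k)
  if d = [] then 0
  else if d.length = 2 ∧ pvGetD a (pvGetD d 0) = pvGetD s (pvGetD d 1)
          ∧ pvGetD a (pvGetD d 1) = pvGetD s (pvGetD d 0) then 1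
  else -1

-- ===== PRECONDITION & SPEC =====
def Spec_swapToSort (a : List Int) (out : Int) : Prop := out = swapToSort_alt a
instance (a : List Int) (out : Int) : Decidable (Spec_swapToSort a out) := by unfold Spec_swapToSort; infer_instance

-- ===== CLAIM (what is proved, stated in full; the proofs are below) =====
def Claim_equal_swapToSort : Prop := ∀ (a : List Int), Dom_swapToSort a → Spec_swapToSort a (swapToSort a)

-- ===== LEMMAS AND PROOFS =====

lemma pvGetD_nat (l : List Int) (k : Nat) (h : k < l.length) : pvGetD l k = l[k] := by
  rw [pvGetD, PySem.List.pyGetD_eq_getElem _ _ (by omega) (by exact_mod_cast h)]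
  simp

lemma adjSorted_iff (l : List Int) : pvAdjSorted l = true ↔ l.Pairwise (· ≤ ·) := by
  rw [← List.isChain_iff_pairwise, List.isChain_iff_getElem]
  unfold pvAdjSorted
  rw [List.all_eq_true]
  constructor
  · intro h i hi
    have hk := h (i : Int) (PySem.List.mem_pyRange_one.2 ⟨by omega, by omega⟩)
    have e1 : pvGetD l (i : Int) = l[i]'(by omega) := pvGetD_nat l i (by omega)
    have e2 : pvGetD l ((i : Int) + 1) = l[i+1] := by
      have : ((i : Int) + 1) = ((i + 1 : Nat) : Int) := by push_cast; ring
      rw [this]; exact pvGetD_nat l (i+1) hi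
    simp only [decide_eq_true_eq, e1, e2] at hk
    exact hk
  · intro h k hk
    obtain ⟨h0, h1⟩ := PySem.List.mem_pyRange_one.1 hk
    have hkn : k.toNat + 1 < l.length := by omega
    have e1 : pvGetD l k = l[k.toNat]'(by omega) := by
      have hc : k = ((k.toNat : Nat) : Int) := by omega
      conv_lhs => rw [hc]
      exact pvGetD_nat l k.toNat (by omega)
    have e2 : pvGetD l (k + 1) = l[k.toNat + 1] := by
      have hc : k + 1 = ((k.toNat + 1 : Nat) : Int) := by omega
      conv_lhs => rw [hc]
      exact pvGetD_nat l (k.toNat + 1) hkn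
    simp only [decide_eq_true_eq, e1, e2]
    exact h k.toNat hkn

lemma pvSwap_nat (a : List Int) (I J : Nat) (hI : I < a.length) (hJ : J < a.length) :
    pvSwap a I J = (a.set J (a[I]'hI)).set I (a[J]'hJ) := by
  rw [pvSwap, pvGetD_nat a I hI, pvGetD_nat a J hJ]
  simp

lemma agree_pairwise (a : List Int)
    (h : ∀ (k : Nat) (hk : k < a.length),
      a[k] = (PySem.List.sorted a (fun x => x) false)[k]'(by simpa [PySem.List.length_sorted] using hk)) :
    a.Pairwise (· ≤ ·) := by
  have heq : a = PySem.List.sorted a (fun x => x) false :=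
    List.ext_getElem (by simp [PySem.List.length_sorted]) (fun k h1 h2 => h k h1)
  have hs : (PySem.List.sorted a (fun x => x) false).Pairwise (· ≤ ·) := by
    simpa using PySem.List.sorted_pairwise a (fun x => x)
  rw [heq]; exact hs

lemma swap_eq_sorted (a : List Int) (I J : Nat) (hI : I < a.length) (hJ : J < a.length)
    (hsI : (PySem.List.sorted a (fun x => x) false)[I]'(by simpa [PySem.List.length_sorted] using hI) = a[J]'hJ)
    (hsJ : (PySem.List.sorted a (fun x => x) false)[J]'(by simpa [PySem.List.length_sorted] using hJ) = a[I]'hI)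
    (hoff : ∀ (k : Nat) (hk : k < a.length), k ≠ I → k ≠ J →
      a[k] = (PySem.List.sorted a (fun x => x) false)[k]'(by simpa [PySem.List.length_sorted] using hk)) :
    pvSwap a I J = PySem.List.sorted a (fun x => x) false := by
  rw [pvSwap_nat a I J hI hJ]
  apply List.ext_getElem (by simp [PySem.List.length_sorted])
  intro k h1 h2
  rw [List.getElem_set, List.getElem_set]
  by_cases hkI : I = k
  · subst hkI; simp [hsI]
  · simp only [hkI, if_false]
    by_cases hkJ : J = k
    · subst hkJ; simp [hsJ]
    · simp only [hkJ, if_false]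
      exact hoff k (by simpa using h1) (fun h => hkI h.symm) (fun h => hkJ h.symm)

def sortedA (a : List Int) : List Int := PySem.List.sorted a (fun x => x) false
def dList (a : List Int) : List Int :=
  (PySem.List.pyRange 0 (a.length : Int) 1).filter (fun k => pvGetD a k != pvGetD (sortedA a) k)

lemma length_sortedA (a : List Int) : (sortedA a).length = a.length := by
  simp [sortedA, PySem.List.length_sorted]

lemma pred_iff (a : List Int) (k : Nat) (hk : k < a.length) :
    ((pvGetD a k != pvGetD (sortedA a) k) = true) ↔
      a[k] ≠ (sortedA a)[k]'(by rw [length_sortedA]; exact hk) := by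
  rw [pvGetD_nat a k hk, pvGetD_nat (sortedA a) k (by rw [length_sortedA]; exact hk)]
  simp

lemma filter_pair (n : Nat) (p : Int → Bool) (I J : Nat) (hIJ : I < J) (hJ : J < n)
    (h : ∀ k : Int, 0 ≤ k → k < n → (p k = true ↔ (k = I ∨ k = J))) :
    (PySem.List.pyRange 0 (n : Int) 1).filter p = [(I : Int), (J : Int)] := by
  have e1 : PySem.List.pyRange 0 (n : Int) 1 =
      PySem.List.pyRange 0 (I : Int) 1 ++ (PySem.List.pyRange (I : Int) ((I : Int)+1) 1 ++
        (PySem.List.pyRange ((I : Int)+1) (J : Int) 1 ++ (PySem.List.pyRange (J : Int) ((J : Int)+1) 1 ++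
          PySem.List.pyRange ((J : Int)+1) (n : Int) 1))) := by
    rw [PySem.List.pyRange_one_append 0 (I : Int) (n : Int) (by omega) (by omega),
        PySem.List.pyRange_one_append (I : Int) ((I : Int)+1) (n : Int) (by omega) (by omega),
        PySem.List.pyRange_one_append ((I : Int)+1) (J : Int) (n : Int) (by omega) (by omega),
        PySem.List.pyRange_one_append (J : Int) ((J : Int)+1) (n : Int) (by omega) (by omega)]
  have hnil : ∀ (lo hi : Int), 0 ≤ lo → hi ≤ n →
      (∀ k : Int, lo ≤ k → k < hi → k ≠ I ∧ k ≠ J) →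
      (PySem.List.pyRange lo hi 1).filter p = [] := by
    intro lo hi h0 hn hoff
    rw [List.filter_eq_nil_iff]
    intro k hk
    obtain ⟨hk1, hk2⟩ := PySem.List.mem_pyRange_one.1 hk
    obtain ⟨n1, n2⟩ := hoff k hk1 hk2
    intro hpk
    rcases (h k (by omega) (by omega)).1 hpk with h' | h'
    · exact n1 h'
    · exact n2 h'
  rw [e1]
  rw [List.filter_append, List.filter_append, List.filter_append, List.filter_append]
  rw [PySem.List.pyRange_one_singleton, PySem.List.pyRange_one_singleton]
  rw [hnil 0 I (by omega) (by omega) (fun k h1 h2 => ⟨by omega, by omega⟩)]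
  rw [hnil ((I:Int)+1) J (by omega) (by omega) (fun k h1 h2 => ⟨by omega, by omega⟩)]
  rw [hnil ((J:Int)+1) n (by omega) (by omega) (fun k h1 h2 => ⟨by omega, by omega⟩)]
  have pI : p (I : Int) = true := (h I (by omega) (by omega)).2 (Or.inl rfl)
  have pJ : p (J : Int) = true := (h J (by omega) (by omega)).2 (Or.inr rfl)
  simp [List.filter, pI, pJ]

lemma pvGetD_pair0 (x y : Int) : pvGetD [x, y] 0 = x := rfl
lemma pvGetD_pair1 (x y : Int) : pvGetD [x, y] 1 = y := rfl

lemma forward (a : List Int) (hp : ¬ a.Pairwise (· ≤ ·))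
    (h : (PySem.List.pyRange 0 (a.length : Int) 1).any (fun i =>
      (PySem.List.pyRange i (a.length : Int) 1).any (fun j => pvAdjSorted (pvSwap a i j))) = true) :
    ∃ I J : Nat, I < J ∧ J < a.length ∧ dList a = [(I : Int), (J : Int)] ∧
      pvGetD a I = pvGetD (sortedA a) J ∧ pvGetD a J = pvGetD (sortedA a) I := by
  rw [List.any_eq_true] at h
  obtain ⟨i, hi, h⟩ := h
  rw [List.any_eq_true] at h
  obtain ⟨j, hj, h⟩ := h
  obtain ⟨hi0, hin⟩ := PySem.List.mem_pyRange_one.1 hi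
  obtain ⟨hij, hjn⟩ := PySem.List.mem_pyRange_one.1 hj
  obtain ⟨I, rfl⟩ : ∃ I : Nat, i = (I : Int) := ⟨i.toNat, by omega⟩
  obtain ⟨J, rfl⟩ : ∃ J : Nat, j = (J : Int) := ⟨j.toNat, by omega⟩
  have hI : I < a.length := by omega
  have hJ : J < a.length := by omega
  rw [pvSwap_nat a I J hI hJ] at h
  have hpw := (adjSorted_iff _).1 h
  have hne_idx : I ≠ J := by
    intro hEq
    subst hEq
    apply hp
    have e : (a.set I (a[I]'hI)).set I (a[I]'hI) = a := by
      rw [List.set_set, List.set_getElem_self]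
    rwa [e] at hpw
  have hIJ : I < J := by omega
  have hneq : a[I]'hI ≠ a[J]'hJ := by
    intro hEq
    apply hp
    have e1 : a.set J (a[I]'hI) = a := by rw [hEq]; exact List.set_getElem_self hJ
    have e2 : (a.set J (a[I]'hI)).set I (a[J]'hJ) = a := by
      rw [e1, ← hEq]; exact List.set_getElem_self hI
    rwa [e2] at hpw
  have perm : ((a.set J (a[I]'hI)).set I (a[J]'hJ)).Perm a := List.set_set_perm hJ hI
  have hs : sortedA a = (a.set J (a[I]'hI)).set I (a[J]'hJ) :=
    PySem.List.sorted_id_eq_of_perm_of_pairwise a _ perm hpw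
  have hslen : (sortedA a).length = a.length := length_sortedA a
  have hsk : ∀ (k : Nat) (hk : k < a.length),
      (sortedA a)[k]'(by omega) =
        if I = k then a[J]'hJ else if J = k then a[I]'hI else a[k] := by
    intro k hk
    rw [List.getElem_of_eq hs (by omega), List.getElem_set, List.getElem_set]
  have hsI : (sortedA a)[I]'(by omega) = a[J]'hJ := by
    rw [hsk I hI, if_pos rfl]
  have hsJ : (sortedA a)[J]'(by omega) = a[I]'hI := by
    rw [hsk J hJ, if_neg (by omega : ¬ I = J), if_pos rfl]
  have hchar : ∀ k : Int, 0 ≤ k → k < (a.length : Int) →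
      ((pvGetD a k != pvGetD (sortedA a) k) = true ↔ (k = (I : Int) ∨ k = (J : Int))) := by
    intro k h0 hn
    obtain ⟨K, rfl⟩ : ∃ K : Nat, k = (K : Int) := ⟨k.toNat, by omega⟩
    have hk : K < a.length := by omega
    rw [pred_iff a K hk]
    constructor
    · intro hne
      by_contra hcon
      push Not at hcon
      obtain ⟨c1, c2⟩ := hcon
      apply hne
      rw [hsk K hk, if_neg (by omega : ¬ I = K), if_neg (by omega : ¬ J = K)]
    · intro hor
      rcases hor with h' | h'
      · have : K = I := by omega
        subst this
        rw [hsI]; exact hneq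
      · have : K = J := by omega
        subst this
        rw [hsJ]; exact fun hEq => hneq hEq.symm
  refine ⟨I, J, hIJ, hJ, ?_, ?_, ?_⟩
  · exact filter_pair a.length _ I J hIJ hJ hchar
  · rw [pvGetD_nat a I hI, pvGetD_nat (sortedA a) J (by omega), hsJ]
  · rw [pvGetD_nat a J hJ, pvGetD_nat (sortedA a) I (by omega), hsI]

lemma backward (a : List Int) (I J : Nat) (hIJ : I < J) (hJ : J < a.length)
    (hd : dList a = [(I : Int), (J : Int)])
    (e1 : pvGetD a I = pvGetD (sortedA a) J) (e2 : pvGetD a J = pvGetD (sortedA a) I) :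
    (PySem.List.pyRange 0 (a.length : Int) 1).any (fun i =>
      (PySem.List.pyRange i (a.length : Int) 1).any (fun j => pvAdjSorted (pvSwap a i j))) = true := by
  have hI : I < a.length := by omega
  have hsI : (sortedA a)[I]'(by rw [length_sortedA]; omega) = a[J]'hJ := by
    rw [← pvGetD_nat a J hJ, ← pvGetD_nat (sortedA a) I (by rw [length_sortedA]; omega), e2]
  have hsJ : (sortedA a)[J]'(by rw [length_sortedA]; omega) = a[I]'hI := by
    rw [← pvGetD_nat a I hI, ← pvGetD_nat (sortedA a) J (by rw [length_sortedA]; omega), e1]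
  have hoff : ∀ (k : Nat) (hk : k < a.length), k ≠ I → k ≠ J →
      a[k] = (sortedA a)[k]'(by rw [length_sortedA]; omega) := by
    intro k hk hkI hkJ
    by_contra hne
    have hmem : (k : Int) ∈ dList a := by
      rw [dList, List.mem_filter]
      refine ⟨PySem.List.mem_pyRange_one.2 ⟨by omega, by omega⟩, ?_⟩
      exact (pred_iff a k hk).2 hne
    rw [hd] at hmem
    simp only [List.mem_cons, List.not_mem_nil, or_false] at hmem
    rcases hmem with h' | h'
    · exact hkI (by omega)
    · exact hkJ (by omega)
  have hswap : pvSwap a (I : Int) (J : Int) = sortedA a :=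
    swap_eq_sorted a I J hI hJ hsI hsJ hoff
  have hpw : (pvSwap a (I : Int) (J : Int)).Pairwise (· ≤ ·) := by
    rw [hswap]
    simpa using PySem.List.sorted_pairwise a (fun x => x)
  rw [List.any_eq_true]
  refine ⟨(I : Int), PySem.List.mem_pyRange_one.2 ⟨by omega, by omega⟩, ?_⟩
  rw [List.any_eq_true]
  refine ⟨(J : Int), PySem.List.mem_pyRange_one.2 ⟨by omega, by omega⟩, ?_⟩
  exact (adjSorted_iff _).2 hpw

lemma alt_eq (a : List Int) : swapToSort_alt a =
    if dList a = [] then 0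
    else if (dList a).length = 2 ∧ pvGetD a (pvGetD (dList a) 0) = pvGetD (sortedA a) (pvGetD (dList a) 1)
            ∧ pvGetD a (pvGetD (dList a) 1) = pvGetD (sortedA a) (pvGetD (dList a) 0) then 1
    else -1 := rfl

lemma dList_ne_nil (a : List Int) (hp : ¬ a.Pairwise (· ≤ ·)) : dList a ≠ [] := by
  intro hnil
  apply hp
  apply agree_pairwise
  intro k hk
  by_contra hne
  have hmem : (k : Int) ∈ dList a := by
    rw [dList, List.mem_filter]
    exact ⟨PySem.List.mem_pyRange_one.2 ⟨by omega, by omega⟩, (pred_iff a k hk).2 hne⟩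
  rw [hnil] at hmem
  exact List.not_mem_nil hmem

lemma main_eq (a : List Int) : swapToSort a = swapToSort_alt a := by
  rw [alt_eq]
  by_cases hp : a.Pairwise (· ≤ ·)
  · have h1 : pvAdjSorted a = true := (adjSorted_iff a).2 hp
    have hs : sortedA a = a :=
      PySem.List.sorted_id_eq_of_perm_of_pairwise a a (List.Perm.refl a) hp
    have hnil : dList a = [] := by
      rw [dList, List.filter_eq_nil_iff]
      intro k hk
      rw [hs]
      simp
    rw [swapToSort, if_pos h1, hnil]
    simp
  · have h1 : pvAdjSorted a = false := by
      rw [← Bool.not_eq_true, adjSorted_iff]; exact hp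
    have hnn : ¬ (dList a = []) := dList_ne_nil a hp
    rw [swapToSort, h1, if_neg (by simp), if_neg hnn]
    by_cases hBC : (dList a).length = 2 ∧
        pvGetD a (pvGetD (dList a) 0) = pvGetD (sortedA a) (pvGetD (dList a) 1)
        ∧ pvGetD a (pvGetD (dList a) 1) = pvGetD (sortedA a) (pvGetD (dList a) 0)
    · rw [if_pos hBC]
      obtain ⟨hlen2, hc1, hc2⟩ := hBC
      obtain ⟨x, y, hd⟩ := List.length_eq_two.1 hlen2
      have hxmem : x ∈ dList a := by rw [hd]; simp
      have hymem : y ∈ dList a := by rw [hd]; simp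
      have hxf : x ∈ (PySem.List.pyRange 0 (a.length : Int) 1).filter
          (fun k => pvGetD a k != pvGetD (sortedA a) k) := by rwa [dList] at hxmem
      have hyf : y ∈ (PySem.List.pyRange 0 (a.length : Int) 1).filter
          (fun k => pvGetD a k != pvGetD (sortedA a) k) := by rwa [dList] at hymem
      obtain ⟨hx0, hxn⟩ := PySem.List.mem_pyRange_one.1 (List.mem_filter.1 hxf).1
      obtain ⟨hy0, hyn⟩ := PySem.List.mem_pyRange_one.1 (List.mem_filter.1 hyf).1
      have hdpw : (dList a).Pairwise (· < ·) :=
        (PySem.List.pairwise_lt_pyRange_one 0 (a.length : Int)).filter _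
      have hxy : x < y := by
        rw [hd] at hdpw
        exact (List.pairwise_cons.1 hdpw).1 y (by simp)
      obtain ⟨X, rfl⟩ : ∃ X : Nat, x = (X : Int) := ⟨x.toNat, by omega⟩
      obtain ⟨Y, rfl⟩ : ∃ Y : Nat, y = (Y : Int) := ⟨y.toNat, by omega⟩
      rw [hd, pvGetD_pair0, pvGetD_pair1] at hc1 hc2
      have := backward a X Y (by omega) (by omega) hd hc1 hc2
      rw [this]
      simp
    · rw [if_neg hBC]
      rcases hA : (PySem.List.pyRange 0 (a.length : Int) 1).any (fun i =>
          (PySem.List.pyRange i (a.length : Int) 1).any (fun j => pvAdjSorted (pvSwap a i j))) with hf | ht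
      · simp
      · exfalso
        obtain ⟨I, J, hIJ, hJ, hd, e1, e2⟩ := forward a hp hA
        apply hBC
        rw [hd, pvGetD_pair0, pvGetD_pair1]
        exact ⟨rfl, e1, e2⟩

-- ===== VERDICT (by name: the statement is the Claim_ definition above) =====
theorem swapToSort_spec : Claim_equal_swapToSort := by
  intro a _
  unfold Spec_swapToSort
  exact main_eq a
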